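-- pv_equiv track=rewrite | github.com/assafkip/q-founder-os | kipi-cluster-add.py | find_table_in_section
-- ===== SOURCE A (Python) =====
-- def find_table_in_section(lines, start, end):
--     """Find the instance table within the cluster section."""
--     table_start = None
--     table_end = None
--     for i in range(start, end):
--         if lines[i].startswith("| Instance") or lines[i].startswith("| strategy") or lines[i].startswith("| product"):
--             if table_start is None:
--                 table_start = i
--             table_end = i + 1
--         elif table_start is not None and lines[i].startswith("|"):
--             table_end = i + 1
--         elif table_start is not None and not lines[i].startswith("|"):
--             break
--     return table_start, table_end
-- ===== SOURCE B (Python) =====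
-- HEADER_PREFIXES = ("| Instance", "| strategy", "| product")
--
-- def find_table_in_section(lines, start, end):
--     """Find the instance table within the cluster section."""
--     # Phase 1: find the first header line.
--     table_start = None
--     for i in range(start, end):
--         if lines[i].startswith(HEADER_PREFIXES):
--             table_start = i
--             break
--     if table_start is None:
--         return None, None
--     # Phase 2: extend through contiguous '|' lines.
--     table_end = table_start + 1
--     for i in range(table_start + 1, end):
--         if lines[i].startswith("|"):
--             table_end = i + 1
--         else:
--             break
--     return table_start, table_end
-- ===== Notes on version B (the rewrite author's own statement) =====
-- stated objective: simpler
-- what changed: Replaces the single stateful loop (Optional table_start, three-way branch, break) by two phases: first find the first header line, then extend through contiguous '|' lines; uses the fact that all header prefixes start with '|'.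
import Mathlib
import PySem

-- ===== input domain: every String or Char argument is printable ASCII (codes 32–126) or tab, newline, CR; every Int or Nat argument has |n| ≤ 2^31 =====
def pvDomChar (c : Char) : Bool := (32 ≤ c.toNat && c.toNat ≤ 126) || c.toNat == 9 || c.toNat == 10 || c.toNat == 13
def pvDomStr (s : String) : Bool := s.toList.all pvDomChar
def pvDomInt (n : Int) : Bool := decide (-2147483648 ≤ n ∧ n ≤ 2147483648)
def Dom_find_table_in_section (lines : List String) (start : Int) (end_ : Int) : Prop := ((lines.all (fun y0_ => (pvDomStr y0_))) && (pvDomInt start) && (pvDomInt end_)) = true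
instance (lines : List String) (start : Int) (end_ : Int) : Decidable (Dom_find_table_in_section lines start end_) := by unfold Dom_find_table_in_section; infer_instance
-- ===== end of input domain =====

-- B replaces A's single stateful loop by two phases (find the first header line, then
-- extend through contiguous '|' lines); objective: simpler. Equivalence of the RETURN values.

-- ===== PORT A =====
-- A's loop over range(start, end) with state (table_start, table_end); the third branch is 'break'.
def ftisLoopA (lines : List String) : List Int → Option Int × Option Int → Option Int × Option Int
  | [], st => st
  | i :: rest, (ts, te) =>
    let s := (PySem.List.pyGet? lines i).getD ""
    if PySem.Str.startswith s "| Instance" || PySem.Str.startswith s "| strategy" || PySem.Str.startswith s "| product" then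
      ftisLoopA lines rest ((if ts.isNone then some i else ts), some (i + 1))
    else if ts.isSome && PySem.Str.startswith s "|" then
      ftisLoopA lines rest (ts, some (i + 1))
    else if ts.isSome && !(PySem.Str.startswith s "|") then
      (ts, te)
    else
      ftisLoopA lines rest (ts, te)

def find_table_in_section (lines : List String) (start : Int) (end_ : Int) : Option Int × Option Int :=
  ftisLoopA lines (PySem.List.pyRange start end_ 1) (none, none)

-- ===== PORT B =====
def ftisIsHeader (s : String) : Bool :=
  PySem.Str.startswith s "| Instance" || PySem.Str.startswith s "| strategy" || PySem.Str.startswith s "| product"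

-- Phase 1: first index in the range whose line is a header line.
def ftisFindHeader (lines : List String) : List Int → Option Int
  | [] => none
  | i :: rest =>
    if ftisIsHeader ((PySem.List.pyGet? lines i).getD "") then some i
    else ftisFindHeader lines rest

-- Phase 2: extend table_end through contiguous '|' lines, stop at the first other line.
def ftisScan (lines : List String) : List Int → Int → Int
  | [], te => te
  | i :: rest, te =>
    if PySem.Str.startswith ((PySem.List.pyGet? lines i).getD "") "|" then
      ftisScan lines rest (i + 1)
    else te

def find_table_in_section_alt (lines : List String) (start : Int) (end_ : Int) : Option Int × Option Int :=
  match ftisFindHeader lines (PySem.List.pyRange start end_ 1) with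
  | none => (none, none)
  | some t => (some t, some (ftisScan lines (PySem.List.pyRange (t + 1) end_ 1) (t + 1)))

-- ===== PRECONDITION & SPEC =====
-- helper used only by Pre_: a header line (same three literal prefixes, restated independently)
def ftisPreHeader (lines : List String) (h : Int) : Bool :=
  PySem.Str.startswith ((PySem.List.pyGet? lines h).getD "") "| Instance" ||
  PySem.Str.startswith ((PySem.List.pyGet? lines h).getD "") "| strategy" ||
  PySem.Str.startswith ((PySem.List.pyGet? lines h).getD "") "| product"

-- Pre_ excludes EXACTLY the inputs on which Python A raises IndexError: a non-empty range that
-- starts below -len, or runs past len with no early break available (a break needs a header line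
-- followed, among the in-range valid indices, by a line not starting with '|').
def Pre_find_table_in_section (lines : List String) (start : Int) (end_ : Int) : Prop :=
  end_ ≤ start ∨
    (-(lines.length : Int) ≤ start ∧
      (end_ ≤ (lines.length : Int) ∨
        ((PySem.List.pyRange start (lines.length : Int) 1).any (fun h =>
          ftisPreHeader lines h &&
          (PySem.List.pyRange (h + 1) (lines.length : Int) 1).any (fun j =>
            !(PySem.Str.startswith ((PySem.List.pyGet? lines j).getD "") "|")))) = true))
instance (lines : List String) (start : Int) (end_ : Int) : Decidable (Pre_find_table_in_section lines start end_) := by unfold Pre_find_table_in_section; infer_instance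

def pvWitness_find_table_in_section : List String × Int × Int :=
  (["Cluster", "| Instance x", "| 1 | 2 |", "tail"], 0, 4)

def Spec_find_table_in_section (lines : List String) (start : Int) (end_ : Int) (out : Option Int × Option Int) : Prop := out = find_table_in_section_alt lines start end_
instance (lines : List String) (start : Int) (end_ : Int) (out : Option Int × Option Int) : Decidable (Spec_find_table_in_section lines start end_ out) := by unfold Spec_find_table_in_section; infer_instance

-- ===== CLAIM (what is proved, stated in full; the proofs are below) =====
def Claim_equal_find_table_in_section : Prop := ∀ (lines : List String) (start : Int) (end_ : Int), Dom_find_table_in_section lines start end_ → Pre_find_table_in_section lines start end_ → Spec_find_table_in_section lines start end_ (find_table_in_section lines start end_)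

-- ===== LEMMAS AND PROOFS =====

-- every header prefix starts with '|'
theorem ftis_header_pipe (s : String) (h : ftisIsHeader s = true) :
    PySem.Str.startswith s "|" = true := by
  have : ['|'] <+: s.toList := by
    unfold ftisIsHeader at h
    simp only [Bool.or_eq_true, PySem.Str.startswith_eq, PySem.Chars.startswith_iff] at h
    rcases h with (h | h) | h
    all_goals exact List.IsPrefix.trans (by decide) h
  simpa [PySem.Str.startswith_eq, PySem.Chars.startswith_iff] using this

-- once table_start is set, A's loop is B's phase-2 scan
theorem ftis_loopA_some (lines : List String) (idxs : List Int) (t te : Int) :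
    ftisLoopA lines idxs (some t, some te) = (some t, some (ftisScan lines idxs te)) := by
  induction idxs generalizing te with
  | nil => rfl
  | cons i rest ih =>
    simp only [ftisLoopA, ftisScan, Option.isSome_some, Bool.true_and]
    by_cases hB : ftisIsHeader ((PySem.List.pyGet? lines i).getD "") = true
    · have hp := ftis_header_pipe _ hB
      rw [if_pos (show (PySem.Str.startswith ((PySem.List.pyGet? lines i).getD "") "| Instance"
            || PySem.Str.startswith ((PySem.List.pyGet? lines i).getD "") "| strategy"
            || PySem.Str.startswith ((PySem.List.pyGet? lines i).getD "") "| product") = true from hB),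
          if_pos hp]
      simpa using ih (i + 1)
    · have hB' : ¬ ((PySem.Str.startswith ((PySem.List.pyGet? lines i).getD "") "| Instance"
            || PySem.Str.startswith ((PySem.List.pyGet? lines i).getD "") "| strategy"
            || PySem.Str.startswith ((PySem.List.pyGet? lines i).getD "") "| product") = true) := hB
      rw [if_neg hB']
      by_cases hp : PySem.Str.startswith ((PySem.List.pyGet? lines i).getD "") "|" = true
      · rw [if_pos hp, if_pos hp, ih]
      · have hpf : PySem.Str.startswith ((PySem.List.pyGet? lines i).getD "") "|" = false :=
          Bool.eq_false_iff.mpr hp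
        rw [if_neg hp, if_neg hp, if_pos (by simpa using hpf)]

-- the main correspondence, by induction on the length of the remaining range
theorem ftis_main (lines : List String) : ∀ (n : Nat) (s e : Int), (e - s).toNat = n →
    ftisLoopA lines (PySem.List.pyRange s e 1) (none, none) =
      (match ftisFindHeader lines (PySem.List.pyRange s e 1) with
       | none => (none, none)
       | some t => (some t, some (ftisScan lines (PySem.List.pyRange (t + 1) e 1) (t + 1)))) := by
  intro n
  induction n with
  | zero =>
    intro s e h
    have hle : e ≤ s := by omega
    rw [PySem.List.pyRange_one_eq_nil hle]
    rfl
  | succ n ih =>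
    intro s e h
    have hlt : s < e := by omega
    rw [PySem.List.pyRange_one_cons hlt]
    simp only [ftisLoopA, ftisFindHeader, Option.isNone_none, Option.isSome_none,
      Bool.false_and, if_true, if_false, Bool.false_eq_true]
    by_cases hB : ftisIsHeader ((PySem.List.pyGet? lines s).getD "") = true
    · rw [if_pos (show (PySem.Str.startswith ((PySem.List.pyGet? lines s).getD "") "| Instance"
            || PySem.Str.startswith ((PySem.List.pyGet? lines s).getD "") "| strategy"
            || PySem.Str.startswith ((PySem.List.pyGet? lines s).getD "") "| product") = true from hB),
          if_pos hB, ftis_loopA_some]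
    · have hB' : ¬ ((PySem.Str.startswith ((PySem.List.pyGet? lines s).getD "") "| Instance"
            || PySem.Str.startswith ((PySem.List.pyGet? lines s).getD "") "| strategy"
            || PySem.Str.startswith ((PySem.List.pyGet? lines s).getD "") "| product") = true) := hB
      rw [if_neg hB', if_neg hB]
      exact ih (s + 1) e (by omega)

-- ===== VERDICT (by name: the statement is the Claim_ definition above) =====
theorem find_table_in_section_spec : Claim_equal_find_table_in_section := by
  intro lines start end_ _ _
  unfold Spec_find_table_in_section find_table_in_section find_table_in_section_alt
  exact ftis_main lines (end_ - start).toNat start end_ rfl
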